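-- pv_equiv track=rewrite | github.com/justin-chernyatevich/cg-ol | cg-ol.py | increase_array
-- ===== SOURCE A (Python) =====
-- def copy_array(array_1, array_2):
--     for i in range(len(array_1)):
--         if type(array_1[i]) == list:
--              array_2.append([])
--              for j in range(len(array_1[i])):
--                  array_2[len(array_2) - 1].append(array_1[i][j])
--
-- def increase_array(array, row, col):
--     result = []
--     copy_array(array, result)
--     addr = row - len(array)
--     addc = col - len(array[0])
--     down = False
--     for i in range(2):
--         for j in range(addr // 2):
--             if down:
--                 result.append([0 for i in range(len(array[0]))])
--             else:
--                 result.insert(0, [0 for i in range(len(array[0]))])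
--         down = True
--     if (addr % 2 != 0 and addr > 0):
--         result.append([0 for i in range(len(array[0]))])
--     right = False
--     for i in range(2):
--         for j in range(len(result)):
--             for j2 in range(addc // 2):
--                 if right:
--                     result[j].append(0)
--                 else:
--                     result[j].insert(0, 0)
--         right = True
--     if (addc % 2 != 0 and addc > 0):
--         for i in range(len(result)):
--             result[i].append(0)
--     return result
-- ===== SOURCE B (Python) =====
-- def increase_array(array, row, col):
--     n0 = len(array[0])
--     addr = row - len(array)
--     addc = col - n0
--     top = addr // 2 if addr > 0 else 0
--     bottom = addr - top if addr > 0 else 0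
--     left = addc // 2 if addc > 0 else 0
--     right = addc - left if addc > 0 else 0
--     zrow = [0] * (left + n0 + right)
--     mid = [[0] * left + list(r) + [0] * right for r in array]
--     return [list(zrow) for _ in range(top)] + mid + [list(zrow) for _ in range(bottom)]
-- ===== Notes on version B (the rewrite author's own statement) =====
-- stated objective: faster
-- what changed: Replaces A's element-by-element copy, repeated insert(0,...) front-insertions and per-row inner padding loops with a direct replicate-and-concatenate construction of the padded grid; intended as asymptotically faster (O(row*col) vs A's repeated O(n) insertions), a timing run measured B several times faster at the largest size both programs finished (both time out on the very largest grids).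
import Mathlib
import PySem

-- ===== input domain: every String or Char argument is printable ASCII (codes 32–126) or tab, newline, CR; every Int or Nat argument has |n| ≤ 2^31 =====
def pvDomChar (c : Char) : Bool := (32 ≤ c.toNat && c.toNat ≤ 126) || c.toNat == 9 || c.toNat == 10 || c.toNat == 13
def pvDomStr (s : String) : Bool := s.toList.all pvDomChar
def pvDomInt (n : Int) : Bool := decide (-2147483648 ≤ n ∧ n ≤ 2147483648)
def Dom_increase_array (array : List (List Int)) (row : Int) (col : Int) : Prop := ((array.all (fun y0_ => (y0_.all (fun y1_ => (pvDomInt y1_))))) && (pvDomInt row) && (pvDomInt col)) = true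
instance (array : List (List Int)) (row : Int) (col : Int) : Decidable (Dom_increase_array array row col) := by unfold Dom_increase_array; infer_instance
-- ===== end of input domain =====

-- B replaces A's element-by-element copy, insert(0,…) loops and per-row append loops with
-- direct replicate-and-concatenate construction of the padded grid. Intended as faster;
-- a timing run measured B several times faster at the largest size both finished
-- (both time out on the very largest grids, whose output is itself huge).

-- ===== PORT A =====
-- copy_array: appends an element-wise copy of each (list) row to the accumulator
def pvCopyRow (r : List Int) : List Int :=
  r.foldl (fun a x => a ++ [x]) []

def pvCopyArray (array : List (List Int)) : List (List Int) :=
  array.foldl (fun acc r => acc ++ [pvCopyRow r]) []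

def increase_array (array : List (List Int)) (row : Int) (col : Int) : List (List Int) :=
  let result0 := pvCopyArray array
  let addr : Int := row - (array.length : Int)
  let n0 : Nat := (array.headD []).length        -- len(array[0]); array ≠ [] by Pre_
  let addc : Int := col - (n0 : Int)
  let zrow : List Int := List.replicate n0 0      -- [0 for i in range(len(array[0]))]
  let t : Nat := (PySem.Int.floordiv addr 2).toNat
  -- first row pass (down=False): insert at index 0, t times; second pass (down=True): append, t times
  let result1 := (List.range t).foldl (fun acc _ => zrow :: acc) result0
  let result2 := (List.range t).foldl (fun acc _ => acc ++ [zrow]) result1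
  let result3 := if PySem.Int.mod addr 2 ≠ 0 ∧ addr > 0 then result2 ++ [zrow] else result2
  let c : Nat := (PySem.Int.floordiv addc 2).toNat
  -- column passes: each row gets c zeros inserted at the front, then c zeros appended
  let result4 := result3.map (fun r => (List.range c).foldl (fun a _ => (0 : Int) :: a) r)
  let result5 := result4.map (fun r => (List.range c).foldl (fun a _ => a ++ [(0 : Int)]) r)
  if PySem.Int.mod addc 2 ≠ 0 ∧ addc > 0 then result5.map (fun r => r ++ [(0 : Int)]) else result5

-- ===== PORT B =====
def increase_array_alt (array : List (List Int)) (row : Int) (col : Int) : List (List Int) :=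
  let n0 : Nat := (array.headD []).length
  let addr : Int := row - (array.length : Int)
  let addc : Int := col - (n0 : Int)
  let top : Nat := if addr > 0 then (PySem.Int.floordiv addr 2).toNat else 0
  let bottom : Nat := if addr > 0 then (addr - (top : Int)).toNat else 0
  let left : Nat := if addc > 0 then (PySem.Int.floordiv addc 2).toNat else 0
  let right : Nat := if addc > 0 then (addc - (left : Int)).toNat else 0
  let zrow : List Int := List.replicate (left + n0 + right) 0
  let mid := array.map (fun r => List.replicate left 0 ++ r ++ List.replicate right 0)
  List.replicate top zrow ++ mid ++ List.replicate bottom zrow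

-- ===== PRECONDITION & SPEC =====
-- Pre_ excludes array = [], on which A raises IndexError at array[0]
def Pre_increase_array (array : List (List Int)) (row : Int) (col : Int) : Prop := array ≠ []
instance (array : List (List Int)) (row : Int) (col : Int) : Decidable (Pre_increase_array array row col) := by unfold Pre_increase_array; infer_instance
def pvWitness_increase_array : List (List Int) × Int × Int := ([[1, 2], [3, 4]], 4, 5)

def Spec_increase_array (array : List (List Int)) (row : Int) (col : Int) (out : List (List Int)) : Prop := out = increase_array_alt array row col
instance (array : List (List Int)) (row : Int) (col : Int) (out : List (List Int)) : Decidable (Spec_increase_array array row col out) := by unfold Spec_increase_array; infer_instance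

-- ===== CLAIM (what is proved, stated in full; the proofs are below) =====
def Claim_equal_increase_array : Prop := ∀ (array : List (List Int)) (row : Int) (col : Int), Dom_increase_array array row col → Pre_increase_array array row col → Spec_increase_array array row col (increase_array array row col)

-- ===== LEMMAS AND PROOFS =====

theorem pvCopyRow_eq (r : List Int) : pvCopyRow r = r := by
  simpa [pvCopyRow] using (PySem.List.foldl_append_singleton_eq_map (l := r) (f := id) (acc := ([] : List Int)))

theorem pvCopyArray_eq (a : List (List Int)) : pvCopyArray a = a := by
  have h := PySem.List.foldl_append_singleton_eq_map (l := a) (f := pvCopyRow) (acc := ([] : List (List Int)))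
  have h2 : List.map pvCopyRow a = List.map id a :=
    List.map_congr_left (fun r _ => pvCopyRow_eq r)
  simpa [pvCopyArray, h2] using h

theorem foldl_cons_replicate {α : Type} (z : α) (t : Nat) (acc : List α) :
    (List.range t).foldl (fun acc _ => z :: acc) acc = List.replicate t z ++ acc := by
  induction t generalizing acc with
  | zero => simp
  | succ n ih => simp [List.range_succ, ih, List.replicate_succ]

theorem foldl_append_replicate {α : Type} (z : α) (t : Nat) (acc : List α) :
    (List.range t).foldl (fun acc _ => acc ++ [z]) acc = acc ++ List.replicate t z := by
  induction t generalizing acc with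
  | zero => simp
  | succ n ih => simp [List.range_succ, ih, List.replicate_succ']

theorem floordiv_nonpos (d : Int) (hd : d ≤ 0) : PySem.Int.floordiv d 2 ≤ 0 := by
  have := PySem.Int.floordiv_mul_add_mod d 2
  have h1 := PySem.Int.mod_nonneg (a := d) (b := 2) (by norm_num)
  have h2 := PySem.Int.mod_lt (a := d) (b := 2) (by norm_num)
  omega

theorem increase_array_spec' (array : List (List Int)) (row col : Int)
    (hne : array ≠ []) : increase_array array row col = increase_array_alt array row col := by
  unfold increase_array increase_array_alt
  simp only [pvCopyArray_eq, foldl_cons_replicate, foldl_append_replicate]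
  set n0 := (array.headD []).length with hn0
  set addr := row - (array.length : Int) with haddr
  set addc := col - (n0 : Int) with haddc
  set t := (PySem.Int.floordiv addr 2).toNat with ht
  set c := (PySem.Int.floordiv addc 2).toNat with hc
  set er : Nat := if PySem.Int.mod addr 2 ≠ 0 ∧ addr > 0 then 1 else 0 with her
  set ec : Nat := if PySem.Int.mod addc 2 ≠ 0 ∧ addc > 0 then 1 else 0 with hec
  -- arithmetic facts about the halves
  have hfr := PySem.Int.floordiv_mul_add_mod addr 2
  have hmr1 := PySem.Int.mod_nonneg (a := addr) (b := 2) (by norm_num)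
  have hmr2 := PySem.Int.mod_lt (a := addr) (b := 2) (by norm_num)
  have hfc := PySem.Int.floordiv_mul_add_mod addc 2
  have hmc1 := PySem.Int.mod_nonneg (a := addc) (b := 2) (by norm_num)
  have hmc2 := PySem.Int.mod_lt (a := addc) (b := 2) (by norm_num)
  have htr0 : addr ≤ 0 → t = 0 := fun h => by
    have := floordiv_nonpos addr h; omega
  have htc0 : addc ≤ 0 → c = 0 := fun h => by
    have := floordiv_nonpos addc h; omega
  -- the row-surplus and column-surplus conditionals as replicate counts
  have hrowIf : ∀ (X : List (List Int)) (z : List Int),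
      (if PySem.Int.mod addr 2 ≠ 0 ∧ addr > 0 then X ++ [z] else X) = X ++ List.replicate er z := by
    intro X z
    rw [her]
    by_cases h : PySem.Int.mod addr 2 ≠ 0 ∧ addr > 0
    · rw [if_pos h, if_pos h]; simp
    · rw [if_neg h, if_neg h]; simp
  have hcolIf : ∀ (X : List (List Int)),
      (if PySem.Int.mod addc 2 ≠ 0 ∧ addc > 0 then X.map (fun r => r ++ [(0 : Int)]) else X)
        = X.map (fun r => r ++ List.replicate ec 0) := by
    intro X
    rw [hec]
    by_cases h : PySem.Int.mod addc 2 ≠ 0 ∧ addc > 0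
    · rw [if_pos h, if_pos h]; simp
    · rw [if_neg h, if_neg h]; simp
  rw [hrowIf, hcolIf]
  -- B's counts in terms of t, c, er, ec
  have htop : (if addr > 0 then t else 0) = t := by
    by_cases h : addr > 0
    · rw [if_pos h]
    · rw [if_neg h]; exact (htr0 (by omega)).symm
  have hbot : (if addr > 0 then (addr - (Nat.cast (if addr > 0 then t else 0) : Int)).toNat else 0) = t + er := by
    by_cases h : addr > 0
    · rw [if_pos h, if_pos h, her]
      by_cases hm : PySem.Int.mod addr 2 ≠ 0
      · rw [if_pos ⟨hm, h⟩]; omega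
      · rw [if_neg (fun hc => hm hc.1)]
        have hm' : PySem.Int.mod addr 2 = 0 := not_not.mp hm
        omega
    · rw [if_neg h, her, if_neg (fun hc => absurd hc.2 h)]
      have := htr0 (by omega); omega
  have hleft : (if addc > 0 then c else 0) = c := by
    by_cases h : addc > 0
    · rw [if_pos h]
    · rw [if_neg h]; exact (htc0 (by omega)).symm
  have hright : (if addc > 0 then (addc - (Nat.cast (if addc > 0 then c else 0) : Int)).toNat else 0) = c + ec := by
    by_cases h : addc > 0
    · rw [if_pos h, if_pos h, hec]
      by_cases hm : PySem.Int.mod addc 2 ≠ 0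
      · rw [if_pos ⟨hm, h⟩]; omega
      · rw [if_neg (fun hc => hm hc.1)]
        have hm' : PySem.Int.mod addc 2 = 0 := not_not.mp hm
        omega
    · rw [if_neg h, hec, if_neg (fun hc => absurd hc.2 h)]
      have := htc0 (by omega); omega
  rw [hbot, hright, htop, hleft]
  -- collapse both sides to replicates and a single map over `array`
  simp only [List.map_append, List.map_map, List.map_replicate, Function.comp]
  simp [Function.comp, List.append_assoc, List.replicate_append_replicate,
    Nat.add_assoc]

-- ===== VERDICT (by name: the statement is the Claim_ definition above) =====
theorem increase_array_spec : Claim_equal_increase_array := by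
  intro array row col _ hpre
  unfold Spec_increase_array
  exact increase_array_spec' array row col hpre
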